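-- pv_equiv track=rewrite | github.com/humphreyotieno1/CodilityChallenges | BinaryGap/solution.py | solution
-- ===== SOURCE A (Python) =====
-- def solution(N):
--     # Convert the integer to a binary string
--     binary_string = bin(N)[2:]
--
--     # initializing variables
--     maxGap = 0
--     currentGap = 0
--
--     # iterate the binary string
--     isInGap = False
--     for bit in binary_string:
--         if bit == '0':
--             if not isInGap:
--                 isInGap = True
--                 currentGap = 0
--             currentGap += 1
--         else:  # when bit is 1
--             if isInGap:
--                 isInGap = False
--                 maxGap = max(maxGap, currentGap)
--
--     return maxGap
-- ===== SOURCE B (Python) =====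
-- def solution(N):
--     # Strip the bounding ones/trailing zeros, split on '1': every remaining
--     # piece is a zero-run enclosed by ones; the answer is the longest.
--     parts = bin(abs(N))[2:].strip("0").split("1")
--     return max((len(p) for p in parts), default=0)
-- ===== Notes on version B (the rewrite author's own statement) =====
-- stated objective: idiomatic
-- what changed: Replaces the char-by-char state machine (isInGap flag, running counters) by string decomposition: strip the zero padding, split the binary string on '1' so the pieces are exactly the bounded zero-runs, and take the longest.
import Mathlib
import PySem

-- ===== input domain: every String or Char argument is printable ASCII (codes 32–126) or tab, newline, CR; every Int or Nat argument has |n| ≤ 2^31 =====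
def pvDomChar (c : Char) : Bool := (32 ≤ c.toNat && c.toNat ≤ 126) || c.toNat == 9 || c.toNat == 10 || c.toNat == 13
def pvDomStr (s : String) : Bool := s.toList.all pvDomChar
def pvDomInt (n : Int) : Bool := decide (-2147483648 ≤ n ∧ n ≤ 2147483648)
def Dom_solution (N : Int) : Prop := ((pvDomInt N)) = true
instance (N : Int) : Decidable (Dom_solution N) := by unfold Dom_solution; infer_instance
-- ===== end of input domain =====

-- B replaces A's char-by-char state machine by stripping the zero padding and
-- splitting the binary string on '1' (objective: idiomatic; return value only).

-- ===== PORT A =====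
-- one iteration of A's for-loop; state = (maxGap, currentGap, isInGap)
def solutionStep (st : Int × Int × Bool) (bit : Char) : Int × Int × Bool :=
  if bit = '0' then
    (st.1, (if st.2.2 then st.2.1 else 0) + 1, true)
  else
    if st.2.2 then (max st.1 st.2.1, st.2.1, false) else st

def solution (N : Int) : Int :=
  let binaryString := PySem.Str.slice (PySem.Int.pyBin N) (some 2) none
  (binaryString.toList.foldl solutionStep (0, 0, false)).1

-- ===== PORT B =====
def solution_alt (N : Int) : Int :=
  let s := (PySem.Str.slice (PySem.Int.pyBin |N|) (some 2) none).toList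
  let parts := PySem.Chars.splitOn (PySem.Chars.stripChars s ['0']) ['1']
  PySem.List.maxD (parts.map (fun p => (p.length : Int))) (fun y => y) 0

-- ===== PRECONDITION & SPEC =====
def Spec_solution (N : Int) (out : Int) : Prop := out = solution_alt N
instance (N : Int) (out : Int) : Decidable (Spec_solution N out) := by unfold Spec_solution; infer_instance

-- ===== CLAIM (what is proved, stated in full; the proofs are below) =====
def Claim_equal_solution : Prop := ∀ (N : Int), Dom_solution N → Spec_solution N (solution N)

-- ===== LEMMAS AND PROOFS =====

-- functional spec of A's loop: longest zero-run closed by a non-'0' char,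
-- given the current state (g = isInGap, c = currentGap)
def gapG (g : Bool) (c : Int) : List Char → Int
  | [] => 0
  | b :: t =>
    if b = '0' then gapG true (if g then c + 1 else 1) t
    else if g then max c (gapG false c t) else gapG false c t

-- reference split-on-'1' (accumulating the current piece at the front)
def mySplit (pre : List Char) : List Char → List (List Char)
  | [] => [pre]
  | b :: t => if b = '1' then pre :: mySplit [] t else mySplit (pre ++ [b]) t

-- max piece length of mySplit
def MS (pre : List Char) (l : List Char) : Int :=
  ((mySplit pre l).map (fun p => (p.length : Int))).foldl max 0

lemma foldl_max_init (xs : List Int) (a b : Int) :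
    xs.foldl max (max a b) = max a (xs.foldl max b) := by
  induction xs generalizing b with
  | nil => rfl
  | cons x t ih => simpa [List.foldl, max_assoc] using ih (max b x)

lemma gapG_nonneg (l : List Char) : ∀ g c, 0 ≤ gapG g c l := by
  induction l with
  | nil => intro g c; simp [gapG]
  | cons b t ih =>
    intro g c
    by_cases hb : b = '0'
    · rw [show gapG g c (b :: t) = gapG true (if g then c + 1 else 1) t from by simp [gapG, hb]]
      exact ih _ _
    · cases g
      · rw [show gapG false c (b :: t) = gapG false c t from by simp [gapG, hb]]
        exact ih _ _
      · rw [show gapG true c (b :: t) = max c (gapG false c t) from by simp [gapG, hb]]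
        exact le_max_of_le_right (ih _ _)

lemma foldl_solutionStep (l : List Char) : ∀ (m c : Int) (g : Bool), 0 ≤ m →
    (l.foldl solutionStep (m, c, g)).1 = max m (gapG g c l) := by
  induction l with
  | nil => intro m c g hm; simp [gapG, max_eq_left hm]
  | cons b t ih =>
    intro m c g hm
    rw [List.foldl_cons]
    by_cases hb : b = '0'
    · have hstep : solutionStep (m, c, g) b = (m, (if g then c + 1 else 1), true) := by
        cases g <;> simp [solutionStep, hb]
      rw [hstep, ih _ _ _ hm,
        show gapG g c (b :: t) = gapG true (if g then c + 1 else 1) t from by simp [gapG, hb]]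
    · cases g
      · have hstep : solutionStep (m, c, false) b = (m, c, false) := by
          simp [solutionStep, hb]
        rw [hstep, ih _ _ _ hm,
          show gapG false c (b :: t) = gapG false c t from by simp [gapG, hb]]
      · have hstep : solutionStep (m, c, true) b = (max m c, c, false) := by
          simp [solutionStep, hb]
        rw [hstep, ih _ _ _ (le_trans hm (le_max_left m c)),
          show gapG true c (b :: t) = max c (gapG false c t) from by simp [gapG, hb],
          max_assoc]

lemma gapG_zeros (z : List Char) (hz : ∀ c ∈ z, c = '0') : ∀ g c, gapG g c z = 0 := by
  induction z with
  | nil => intro g c; simp [gapG]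
  | cons b t ih =>
    intro g c
    have hb : b = '0' := hz b (by simp)
    rw [show gapG g c (b :: t) = gapG true (if g then c + 1 else 1) t from by simp [gapG, hb]]
    exact ih (fun c hc => hz c (by simp [hc])) _ _

lemma gapG_append_zeros (l z : List Char) (hz : ∀ c ∈ z, c = '0') :
    ∀ g c, gapG g c (l ++ z) = gapG g c l := by
  induction l with
  | nil => intro g c; simp [gapG, gapG_zeros z hz]
  | cons b t ih =>
    intro g c
    by_cases hb : b = '0'
    · simp only [List.cons_append]
      rw [show gapG g c (b :: (t ++ z)) = gapG true (if g then c + 1 else 1) (t ++ z) from by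
          simp [gapG, hb],
        ih, show gapG g c (b :: t) = gapG true (if g then c + 1 else 1) t from by simp [gapG, hb]]
    · cases g
      · simp only [List.cons_append]
        rw [show gapG false c (b :: (t ++ z)) = gapG false c (t ++ z) from by simp [gapG, hb],
          ih, show gapG false c (b :: t) = gapG false c t from by simp [gapG, hb]]
      · simp only [List.cons_append]
        rw [show gapG true c (b :: (t ++ z)) = max c (gapG false c (t ++ z)) from by
            simp [gapG, hb],
          ih, show gapG true c (b :: t) = max c (gapG false c t) from by simp [gapG, hb]]

lemma MS_nil (pre : List Char) : MS pre [] = (pre.length : Int) := by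
  simp [MS, mySplit]

lemma MS_one (pre t : List Char) : MS pre ('1' :: t) = max (pre.length : Int) (MS [] t) := by
  have h : mySplit pre ('1' :: t) = pre :: mySplit [] t := by simp [mySplit]
  rw [MS, h, List.map_cons, List.foldl_cons, max_comm (0 : Int), foldl_max_init]
  rfl

lemma MS_zero (pre t : List Char) (b : Char) (hb : b ≠ '1') :
    MS pre (b :: t) = MS (pre ++ [b]) t := by
  simp [MS, mySplit, hb]

lemma MS_nonneg (pre l : List Char) : 0 ≤ MS pre l :=
  (PySem.List.le_foldl_max _ 0).1

-- the joint characterisation of A's loop spec by the split decomposition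
lemma gapG_eq_MS (l : List Char) (hbin : ∀ c ∈ l, c = '0' ∨ c = '1')
    (hlast : l.getLast? ≠ some '0') :
    (∀ k : Nat, l ≠ [] → gapG true (k : Int) l = MS (List.replicate k '0') l)
      ∧ (∀ c : Int, gapG false c l = MS [] l) := by
  induction l with
  | nil => exact ⟨fun k h => absurd rfl h, fun c => by simp [gapG, MS_nil]⟩
  | cons b t ih =>
    have hbt : ∀ c ∈ t, c = '0' ∨ c = '1' := fun c hc => hbin c (by simp [hc])
    rcases hbin b (by simp) with hb | hb
    · -- b = '0'; then t ≠ [] (else the last char would be '0')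
      subst hb
      cases t with
      | nil => exact absurd rfl hlast
      | cons x t' =>
        have hlt : (x :: t').getLast? ≠ some '0' := by
          rwa [List.getLast?_cons_cons] at hlast
        obtain ⟨ih1, -⟩ := ih hbt hlt
        constructor
        · intro k _
          calc gapG true (k : Int) ('0' :: (x :: t'))
              = gapG true ((k : Int) + 1) (x :: t') := by simp [gapG]
            _ = gapG true ((k + 1 : Nat) : Int) (x :: t') := by push_cast; ring_nf
            _ = MS (List.replicate (k + 1) '0') (x :: t') := ih1 (k + 1) (by simp)
            _ = MS (List.replicate k '0' ++ ['0']) (x :: t') := by rw [List.replicate_succ']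
            _ = MS (List.replicate k '0') ('0' :: (x :: t')) :=
                (MS_zero (List.replicate k '0') (x :: t') '0' (by decide)).symm
        · intro c
          calc gapG false c ('0' :: (x :: t'))
              = gapG true ((1 : Nat) : Int) (x :: t') := by norm_num [gapG]
            _ = MS (List.replicate 1 '0') (x :: t') := ih1 1 (by simp)
            _ = MS ([] ++ ['0']) (x :: t') := by norm_num [List.replicate]
            _ = MS [] ('0' :: (x :: t')) := (MS_zero [] (x :: t') '0' (by decide)).symm
    · -- b = '1'
      subst hb
      cases t with
      | nil =>
        refine ⟨fun k _ => ?_, fun c => ?_⟩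
        · rw [show gapG true (k : Int) ['1'] = max (k : Int) (gapG false (k : Int) []) from by
              simp [gapG],
            MS_one, MS_nil]
          simp [gapG]
        · rw [show gapG false c ['1'] = gapG false c [] from by simp [gapG], MS_one, MS_nil]
          simp [gapG]
      | cons x t' =>
        have hlt : (x :: t').getLast? ≠ some '0' := by
          rwa [List.getLast?_cons_cons] at hlast
        obtain ⟨-, ih2⟩ := ih hbt hlt
        constructor
        · intro k _
          rw [show gapG true (k : Int) ('1' :: (x :: t'))
              = max (k : Int) (gapG false (k : Int) (x :: t')) from by simp [gapG],
            ih2, MS_one]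
          simp
        · intro c
          rw [show gapG false c ('1' :: (x :: t')) = gapG false c (x :: t') from by simp [gapG],
            ih2, MS_one]
          simp [max_eq_right (MS_nonneg [] (x :: t'))]

-- splitOn on separator "1" is mySplit
lemma splitOn_go_eq (fuel : Nat) : ∀ (l cur : List Char) (acc : List (List Char)),
    l.length < fuel →
    PySem.Chars.splitOn.go ['1'] fuel l cur acc = acc.reverse ++ mySplit cur.reverse l := by
  induction fuel with
  | zero => intro l cur acc h; omega
  | succ fuel ih =>
    intro l cur acc h
    cases l with
    | nil => simp [PySem.Chars.splitOn.go, mySplit]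
    | cons c rest =>
      by_cases hc : c = '1'
      · subst hc
        rw [show PySem.Chars.splitOn.go ['1'] (fuel + 1) ('1' :: rest) cur acc
            = PySem.Chars.splitOn.go ['1'] fuel rest [] (cur.reverse :: acc) from by
          simp [PySem.Chars.splitOn.go, List.isPrefixOf]]
        rw [ih rest [] _ (by simp at h; omega)]
        simp [mySplit]
      · have hc' : ('1' : Char) ≠ c := fun hh => hc hh.symm
        rw [show PySem.Chars.splitOn.go ['1'] (fuel + 1) (c :: rest) cur acc
            = PySem.Chars.splitOn.go ['1'] fuel rest (c :: cur) acc from by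
          simp [PySem.Chars.splitOn.go, List.isPrefixOf, hc']]
        rw [ih rest (c :: cur) acc (by simp at h; omega)]
        simp [mySplit, hc]

lemma splitOn_eq_mySplit (l : List Char) :
    PySem.Chars.splitOn l ['1'] = mySplit [] l := by
  rw [PySem.Chars.splitOn, splitOn_go_eq (l.length + 1) l [] [] (by omega)]
  rfl

lemma maxD_eq_foldl (xs : List Int) (hx : ∀ x ∈ xs, 0 ≤ x) :
    PySem.List.maxD xs (fun y => y) 0 = xs.foldl max 0 := by
  cases xs with
  | nil => simp [PySem.List.maxD_nil]
  | cons x t =>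
    rw [PySem.List.maxD_id_cons, List.foldl_cons, max_eq_right (hx x (by simp))]

-- digits of Nat.toDigits 2 are binary, head is '1' for positive n
lemma toDigits_two_binary (m : Nat) : ∀ c ∈ Nat.toDigits 2 m, c = '0' ∨ c = '1' := by
  induction m using Nat.strong_induction_on with
  | _ m ih =>
    intro c hc
    by_cases hm : m < 2
    · rw [Nat.toDigits_of_lt_base hm] at hc
      simp only [List.mem_singleton] at hc
      subst hc
      have h1 : m = 0 ∨ m = 1 := by omega
      rcases h1 with h1 | h1 <;> rw [h1]
      · left; rfl
      · right; rfl
    · rw [Nat.toDigits_of_base_le (by omega) (by omega)] at hc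
      rcases List.mem_append.1 hc with h | h
      · exact ih (m / 2) (by omega) c h
      · simp only [List.mem_singleton] at h
        subst h
        have h2 : m % 2 = 0 ∨ m % 2 = 1 := by omega
        rcases h2 with h2 | h2 <;> rw [h2]
        · left; rfl
        · right; rfl

lemma toDigits_two_head (m : Nat) (hm : 0 < m) : (Nat.toDigits 2 m).head? = some '1' := by
  induction m using Nat.strong_induction_on with
  | _ m ih =>
    by_cases h2 : m < 2
    · have : m = 1 := by omega
      subst this
      rw [Nat.toDigits_of_lt_base (by omega)]
      rfl
    · rw [Nat.toDigits_of_base_le (by omega) (by omega)]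
      have hh := ih (m / 2) (by omega) (by omega)
      cases hd : Nat.toDigits 2 (m / 2) with
      | nil => simp [hd] at hh
      | cons a l => rw [hd] at hh; simpa using hh

-- head of a dropWhile never satisfies the predicate
lemma head?_dropWhile_ne (p : Char → Bool) (l : List Char) :
    ∀ a, (l.dropWhile p).head? = some a → p a = false := by
  induction l with
  | nil => intro a h; simp at h
  | cons b t ih =>
    intro a h
    by_cases hb : p b
    · rw [List.dropWhile_cons_of_pos hb] at h; exact ih a h
    · rw [List.dropWhile_cons_of_neg hb] at h
      simp at h
      subst h
      simpa using hb

-- main list-level equivalence, for a binary string with head '1'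
lemma core (d : List Char) (hbin : ∀ c ∈ d, c = '0' ∨ c = '1')
    (hhead : d.head? = some '1') :
    (d.foldl solutionStep (0, 0, false)).1
      = PySem.List.maxD
          ((PySem.Chars.splitOn (PySem.Chars.stripChars d ['0']) ['1']).map
            (fun p => (p.length : Int))) (fun y => y) 0 := by
  have hdrop : List.dropWhile (fun c => List.contains ['0'] c) d = d := by
    cases d with
    | nil => simp at hhead
    | cons a t =>
      simp at hhead
      subst hhead
      rw [List.dropWhile_cons_of_neg (by decide)]
  have hstrip : PySem.Chars.stripChars d ['0']
      = (List.dropWhile (fun c => List.contains ['0'] c)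
          (List.dropWhile (fun c => List.contains ['0'] c) d).reverse).reverse := rfl
  rw [hdrop] at hstrip
  set R := (List.dropWhile (fun c => List.contains ['0'] c) d.reverse).reverse with hR
  have hdec : d = R ++ (List.takeWhile (fun c => List.contains ['0'] c) d.reverse).reverse := by
    conv_lhs => rw [← List.reverse_reverse d,
      ← List.takeWhile_append_dropWhile (p := fun c => List.contains ['0'] c) (l := d.reverse)]
    rw [List.reverse_append]
  have hz : ∀ c ∈ (List.takeWhile (fun c => List.contains ['0'] c) d.reverse).reverse,
      c = '0' := by
    intro c hc
    rw [List.mem_reverse] at hc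
    have := List.mem_takeWhile_imp hc
    simpa using this
  have hRmem : ∀ c ∈ R, c = '0' ∨ c = '1' := by
    intro c hc
    apply hbin
    rw [hR, List.mem_reverse] at hc
    exact List.mem_reverse.1 ((List.dropWhile_sublist _).mem hc)
  have hRlast : R.getLast? ≠ some '0' := by
    rw [hR, List.getLast?_reverse]
    intro h
    have := head?_dropWhile_ne _ _ _ h
    simp at this
  rw [foldl_solutionStep d 0 0 false le_rfl, max_eq_right (gapG_nonneg d false 0),
    show gapG false 0 d = gapG false 0 R from by
      conv_lhs => rw [hdec]
      exact gapG_append_zeros R _ hz false 0,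
    (gapG_eq_MS R hRmem hRlast).2 0, hstrip, splitOn_eq_mySplit,
    maxD_eq_foldl _ (by
      intro x hx
      simp only [List.mem_map] at hx
      obtain ⟨a, -, rfl⟩ := hx
      positivity)]
  rfl

-- the sliced binary string of A resp. B
lemma slice_pyBin (n : Int) :
    (PySem.Str.slice (PySem.Int.pyBin n) (some 2) none).toList
      = if n < 0 then 'b' :: Nat.toDigits 2 n.natAbs else Nat.toDigits 2 n.toNat := by
  rw [PySem.Str.toList_slice, PySem.Int.toList_pyBin]
  by_cases h : n < 0 <;>
    simp [PySem.Int.toBinChars0b, h, PySem.Chars.slice,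
      PySem.List.slice_from _ (by norm_num : (0 : Int) ≤ 2)]

theorem solution_eq (N : Int) : solution N = solution_alt N := by
  rcases lt_trichotomy N 0 with h | h | h
  · -- negative: A's string is 'b' :: digits(|N|), the 'b' step is a no-op
    have hd : (PySem.Str.slice (PySem.Int.pyBin N) (some 2) none).toList
        = 'b' :: Nat.toDigits 2 N.natAbs := by rw [slice_pyBin, if_pos h]
    have habs : |N| = -N := abs_of_neg h
    have hNN : (-N).toNat = N.natAbs := by omega
    have hd' : (PySem.Str.slice (PySem.Int.pyBin |N|) (some 2) none).toList
        = Nat.toDigits 2 N.natAbs := by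
      rw [habs, slice_pyBin, if_neg (by omega), hNN]
    simp only [solution, solution_alt, hd, hd']
    rw [List.foldl_cons, show solutionStep (0, 0, false) 'b' = (0, 0, false) from by decide]
    exact core _ (toDigits_two_binary _) (toDigits_two_head _ (by omega))
  · subst h
    have hd : (PySem.Str.slice (PySem.Int.pyBin 0) (some 2) none).toList = ['0'] := by
      rw [slice_pyBin, if_neg (by omega)]
      decide
    have hd0 : |(0 : Int)| = 0 := abs_zero
    simp only [solution, solution_alt, hd0, hd]
    decide
  · have hd : (PySem.Str.slice (PySem.Int.pyBin N) (some 2) none).toList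
        = Nat.toDigits 2 N.toNat := by rw [slice_pyBin, if_neg (by omega)]
    have habs : |N| = N := abs_of_pos h
    have hd' : (PySem.Str.slice (PySem.Int.pyBin |N|) (some 2) none).toList
        = Nat.toDigits 2 N.toNat := by rw [habs, slice_pyBin, if_neg (by omega)]
    simp only [solution, solution_alt, hd, hd']
    exact core _ (toDigits_two_binary _) (toDigits_two_head _ (by omega))

-- ===== VERDICT (by name: the statement is the Claim_ definition above) =====
theorem solution_spec : Claim_equal_solution := by
  intro N _
  exact solution_eq N
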